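-- pv_equiv track=rewrite | github.com/masc-ucsc/hagent | hagent/tool/docker_diff_applier.py | _parse_multi_file_diff
-- ===== SOURCE A (Python) =====
-- from typing import List, Optional
--
-- def _parse_multi_file_diff(diff_content: str) -> List[tuple]:
--     """
--     Parse a multi-file diff into separate sections
--
--     Returns:
--         List of tuples (file_path, section_diff)
--     """
--     lines = diff_content.strip().split('\n')
--     sections = []
--     current_section = []
--     current_file = None
--
--     i = 0
--     while i < len(lines):
--         line = lines[i]
--
--         # Look for diff headers
--         if line.startswith('--- a/'):
--             # If we have a current section, save it
--             if current_file and current_section: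
--                 section_diff = '\n'.join(current_section)
--                 sections.append((current_file, section_diff))
--
--             # Start new section
--             current_file = line[6:]  # Remove '--- a/'
--             current_section = [line]
--
--             # Look for the corresponding '+++ b/' line
--             if i + 1 < len(lines) and lines[i + 1].startswith('+++ b/'):
--                 current_section.append(lines[i + 1])
--                 i += 1
--         else:
--             # Add line to current section if we have one
--             if current_file:
--                 current_section.append(line)
--
--         i += 1
--
--     # Don't forget the last section
--     if current_file and current_section:
--         section_diff = '\n'.join(current_section)
--         sections.append((current_file, section_diff))
--
--     return sections
-- ===== SOURCE B (Python) =====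
-- from typing import List
--
-- def _parse_multi_file_diff(diff_content: str) -> List[tuple]:
--     lines = diff_content.strip().split('\n')
--     # Phase 1: group the lines into chunks, one chunk per '--- a/' header;
--     # lines before the first header belong to no chunk and are dropped.
--     chunks = []
--     for line in lines:
--         if line.startswith('--- a/'):
--             chunks.append([line])
--         elif chunks:
--             chunks[-1].append(line)
--     # Phase 2: format each chunk; a header with an empty path yields no section.
--     return [(c[0][6:], '\n'.join(c)) for c in chunks if c[0][6:]]
-- ===== Notes on version B (the rewrite author's own statement) =====
-- stated objective: simpler
-- what changed: Replaces A's stateful scan (current_file/current_section registers, a '+++ b/' lookahead that advances the index, and a duplicated flush at header and at end) by a two-phase decomposition: one plain pass groups lines into per-header chunks, then a single comprehension formats and filters them.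
import Mathlib
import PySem

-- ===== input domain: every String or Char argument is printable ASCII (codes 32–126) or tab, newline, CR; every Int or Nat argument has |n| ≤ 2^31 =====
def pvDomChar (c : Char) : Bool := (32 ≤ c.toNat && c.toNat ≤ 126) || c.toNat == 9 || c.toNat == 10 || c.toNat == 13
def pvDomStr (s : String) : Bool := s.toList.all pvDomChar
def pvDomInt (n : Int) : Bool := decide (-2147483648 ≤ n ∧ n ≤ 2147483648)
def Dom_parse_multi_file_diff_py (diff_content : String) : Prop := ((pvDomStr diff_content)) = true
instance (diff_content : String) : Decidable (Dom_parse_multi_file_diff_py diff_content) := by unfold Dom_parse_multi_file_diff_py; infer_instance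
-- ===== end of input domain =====

-- B replaces A's stateful scan (current_file/current_section, '+++ b/' lookahead, duplicated
-- flush) by a two-phase decomposition: group lines into per-header chunks, then format/filter.

-- ===== PORT A =====
-- Python truthiness of the Optional[str] current_file: None and '' are falsy.
def pvTruthy : Option String → Bool
  | none => false
  | some s => s != ""

-- the while-loop of A: state (sections, current_file, current_section), lookahead on the next line
def pvLoopA (sections : List (String × String)) (cf : Option String) (cs : List String) :
    List String → List (String × String)
  | [] =>
      -- "Don't forget the last section"
      if pvTruthy cf && !cs.isEmpty then sections ++ [(cf.getD "", PySem.Str.join "\n" cs)]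
      else sections
  | l :: rest =>
      if PySem.Str.startswith l "--- a/" then
        let sections' :=
          if pvTruthy cf && !cs.isEmpty then sections ++ [(cf.getD "", PySem.Str.join "\n" cs)]
          else sections
        let f' := PySem.Str.slice l (some 6) none   -- line[6:]
        match rest with
        | l2 :: rest2 =>
            if PySem.Str.startswith l2 "+++ b/" then pvLoopA sections' (some f') [l, l2] rest2
            else pvLoopA sections' (some f') [l] (l2 :: rest2)
        | [] => pvLoopA sections' (some f') [l] []
      else
        if pvTruthy cf then pvLoopA sections cf (cs ++ [l]) rest
        else pvLoopA sections cf cs rest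

def parse_multi_file_diff_py (diff_content : String) : List (String × String) :=
  let lines := (PySem.Str.split? (PySem.Str.strip diff_content) "\n").getD []
  pvLoopA [] none [] lines

-- ===== PORT B =====
-- Phase 1 of B: group lines into chunks, one chunk per '--- a/' header.
def pvLoopB (chunks : List (List String)) : List String → List (List String)
  | [] => chunks
  | l :: rest =>
      if PySem.Str.startswith l "--- a/" then pvLoopB (chunks ++ [[l]]) rest
      else if chunks.isEmpty then pvLoopB chunks rest
      else pvLoopB (chunks.dropLast ++ [chunks.getLastD [] ++ [l]]) rest

-- Phase 2 of B: the comprehension body — format a chunk, dropping empty paths.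
def pvFmt (c : List String) : Option (String × String) :=
  let p := PySem.Str.slice (c.headD "") (some 6) none
  if p != "" then some (p, PySem.Str.join "\n" c) else none

def parse_multi_file_diff_py_alt (diff_content : String) : List (String × String) :=
  let lines := (PySem.Str.split? (PySem.Str.strip diff_content) "\n").getD []
  (pvLoopB [] lines).filterMap pvFmt

-- ===== PRECONDITION & SPEC =====
def Spec_parse_multi_file_diff_py (diff_content : String) (out : List (String × String)) : Prop := out = parse_multi_file_diff_py_alt diff_content
instance (diff_content : String) (out : List (String × String)) : Decidable (Spec_parse_multi_file_diff_py diff_content out) := by unfold Spec_parse_multi_file_diff_py; infer_instance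

-- ===== CLAIM (what is proved, stated in full; the proofs are below) =====
def Claim_equal_parse_multi_file_diff_py : Prop := ∀ (diff_content : String), Dom_parse_multi_file_diff_py diff_content → Spec_parse_multi_file_diff_py diff_content (parse_multi_file_diff_py diff_content)

-- ===== LEMMAS AND PROOFS =====

-- a '+++ b/' line is never a '--- a/' header
lemma pv_plus_not_minus (l : String) (h : PySem.Str.startswith l "+++ b/" = true) :
    PySem.Str.startswith l "--- a/" = false := by
  rw [← Bool.not_eq_true, PySem.Str.startswith_eq, PySem.Chars.startswith_iff]
  rw [PySem.Str.startswith_eq, PySem.Chars.startswith_iff] at h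
  intro hc
  obtain ⟨t1, h1⟩ := h
  obtain ⟨t2, h2⟩ := hc
  rw [← h1, show ("--- a/".toList) = ['-','-','-',' ','a','/'] from rfl,
      show ("+++ b/".toList) = ['+','+','+',' ','b','/'] from rfl] at h2
  simp at h2

-- the invariant tying A's loop state (sections, current_file, current_section) to B's chunks
def pvInv (sections : List (String × String)) (cf : Option String) (cs : List String)
    (chunks : List (List String)) : Prop :=
  (cf = none ∧ cs = [] ∧ sections = [] ∧ chunks = []) ∨
  (∃ f front g, cf = some f ∧ chunks = front ++ [g] ∧ g ≠ [] ∧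
      sections = front.filterMap pvFmt ∧
      PySem.Str.slice (g.headD "") (some 6) none = f ∧
      (f ≠ "" → cs = g))

-- A's flush of the current section produces exactly B's formatting of the chunks so far
lemma pv_flush (sections : List (String × String)) (cf : Option String) (cs : List String)
    (chunks : List (List String)) (h : pvInv sections cf cs chunks) :
    (if pvTruthy cf && !cs.isEmpty then sections ++ [(cf.getD "", PySem.Str.join "\n" cs)]
     else sections) = chunks.filterMap pvFmt := by
  rcases h with ⟨hcf, hcs, hs, hch⟩ | ⟨f, front, g, hcf, hch, hg, hs, hp, hcs⟩
  · subst hcf hcs hs hch; simp [pvTruthy]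
  · subst hcf hch hs
    rcases g with _ | ⟨a, t⟩
    · exact absurd rfl hg
    simp only [List.headD_cons] at hp
    by_cases hf : f = ""
    · subst hf
      simp [pvTruthy, List.filterMap_append, pvFmt, hp]
    · have hcs' := hcs hf; subst hcs'
      simp [pvTruthy, hf, List.filterMap_append, pvFmt, hp]

lemma pv_headD (g : List String) (l : String) (hg : g ≠ []) :
    (g ++ [l]).headD "" = g.headD "" := by cases g <;> simp_all

-- equation lemmas for the ports' loops (the shapes structural recursion reduces on)
lemma pv_loopA_nil (s cf cs) : pvLoopA s cf cs [] =
    if pvTruthy cf && !cs.isEmpty then s ++ [(cf.getD "", PySem.Str.join "\n" cs)] else s := rfl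

lemma pv_loopA_one (s cf cs l) : pvLoopA s cf cs [l] =
      if PySem.Str.startswith l "--- a/" then
        pvLoopA (if pvTruthy cf && !cs.isEmpty then s ++ [(cf.getD "", PySem.Str.join "\n" cs)] else s)
          (some (PySem.Str.slice l (some 6) none)) [l] []
      else
        if pvTruthy cf then pvLoopA s cf (cs ++ [l]) [] else pvLoopA s cf cs [] := rfl

lemma pv_loopA_two (s cf cs l l2 rest2) : pvLoopA s cf cs (l :: l2 :: rest2) =
      if PySem.Str.startswith l "--- a/" then
        (if PySem.Str.startswith l2 "+++ b/" then
          pvLoopA (if pvTruthy cf && !cs.isEmpty then s ++ [(cf.getD "", PySem.Str.join "\n" cs)] else s)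
            (some (PySem.Str.slice l (some 6) none)) [l, l2] rest2
        else
          pvLoopA (if pvTruthy cf && !cs.isEmpty then s ++ [(cf.getD "", PySem.Str.join "\n" cs)] else s)
            (some (PySem.Str.slice l (some 6) none)) [l] (l2 :: rest2))
      else
        if pvTruthy cf then pvLoopA s cf (cs ++ [l]) (l2 :: rest2)
        else pvLoopA s cf cs (l2 :: rest2) := rfl

lemma pv_loopA_cons_nh (s cf cs l rest) (hl : PySem.Str.startswith l "--- a/" = false) :
    pvLoopA s cf cs (l :: rest) =
      if pvTruthy cf then pvLoopA s cf (cs ++ [l]) rest else pvLoopA s cf cs rest := by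
  cases rest
  · rw [pv_loopA_one, if_neg (by rw [hl]; simp)]
  · rw [pv_loopA_two, if_neg (by rw [hl]; simp)]

lemma pv_loopB_nil (c) : pvLoopB c [] = c := rfl

lemma pv_loopB_cons (c l rest) : pvLoopB c (l :: rest) =
      if PySem.Str.startswith l "--- a/" then pvLoopB (c ++ [[l]]) rest
      else if c.isEmpty then pvLoopB c rest
      else pvLoopB (c.dropLast ++ [c.getLastD [] ++ [l]]) rest := rfl

lemma pv_main (n : Nat) : ∀ (rest : List String), rest.length ≤ n →
    ∀ (sections : List (String × String)) (cf : Option String) (cs : List String)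
      (chunks : List (List String)), pvInv sections cf cs chunks →
    pvLoopA sections cf cs rest = (pvLoopB chunks rest).filterMap pvFmt := by
  induction n with
  | zero =>
    intro rest hle sections cf cs chunks h
    have : rest = [] := List.length_eq_zero_iff.mp (Nat.le_zero.mp hle)
    subst this
    rw [pv_loopA_nil, pv_loopB_nil]
    exact pv_flush sections cf cs chunks h
  | succ n ih =>
    intro rest hle sections cf cs chunks h
    cases rest with
    | nil =>
      rw [pv_loopA_nil, pv_loopB_nil]
      exact pv_flush sections cf cs chunks h
    | cons l rest' =>
      have hle' : rest'.length ≤ n := by simpa using hle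
      have hsec := pv_flush sections cf cs chunks h
      by_cases hl : PySem.Str.startswith l "--- a/" = true
      · cases rest' with
        | nil =>
          rw [pv_loopA_one, if_pos hl, pv_loopB_cons, if_pos hl]
          exact ih [] (Nat.zero_le n) _ _ _ _
            (Or.inr ⟨_, chunks, [l], rfl, rfl, by simp, hsec, rfl, fun _ => rfl⟩)
        | cons l2 rest2 =>
          by_cases h2 : PySem.Str.startswith l2 "+++ b/" = true
          · have hnm' : ¬ (PySem.Str.startswith l2 "--- a/" = true) := by
              rw [pv_plus_not_minus l2 h2]; simp
            have hemp : ¬ ((chunks ++ [[l]]).isEmpty = true) := by simp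
            have hle2 : rest2.length ≤ n := by simp at hle'; omega
            rw [pv_loopA_two, if_pos hl, if_pos h2, pv_loopB_cons, if_pos hl, pv_loopB_cons,
              if_neg hnm', if_neg hemp, List.dropLast_concat, List.getLastD_concat,
              List.singleton_append]
            exact ih rest2 hle2 _ _ _ _
              (Or.inr ⟨_, chunks, [l, l2], rfl, rfl, by simp, hsec, rfl, fun _ => rfl⟩)
          · rw [pv_loopA_two, if_pos hl, if_neg h2, pv_loopB_cons, if_pos hl]
            exact ih (l2 :: rest2) hle' _ _ _ _
              (Or.inr ⟨_, chunks, [l], rfl, rfl, by simp, hsec, rfl, fun _ => rfl⟩)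
      · have hl' : PySem.Str.startswith l "--- a/" = false := by
          cases hb : PySem.Str.startswith l "--- a/" <;> simp_all
        rcases h with ⟨hcf, hcs, hs, hch⟩ | ⟨f, front, g, hcf, hch, hg, hs, hp, hcs⟩
        · subst hcf hcs hs hch
          have ht : ¬ (pvTruthy none = true) := by simp [pvTruthy]
          rw [pv_loopA_cons_nh _ _ _ _ _ hl', if_neg ht, pv_loopB_cons, if_neg hl,
            if_pos List.isEmpty_nil]
          exact ih rest' hle' _ _ _ _ (Or.inl ⟨rfl, rfl, rfl, rfl⟩)
        · subst hcf hch hs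
          have hemp : ¬ ((front ++ [g]).isEmpty = true) := by simp
          by_cases hf : f = ""
          · subst hf
            have ht : ¬ (pvTruthy (some "") = true) := by simp [pvTruthy]
            rw [pv_loopA_cons_nh _ _ _ _ _ hl', if_neg ht, pv_loopB_cons, if_neg hl,
              if_neg hemp, List.dropLast_concat, List.getLastD_concat]
            exact ih rest' hle' _ _ _ _
              (Or.inr ⟨_, front, g ++ [l], rfl, rfl, by simp, rfl,
                by rw [pv_headD g l hg]; exact hp, fun hx => absurd rfl hx⟩)
          · obtain rfl := hcs hf
            have ht : pvTruthy (some f) = true := by simp [pvTruthy]; exact hf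
            rw [pv_loopA_cons_nh _ _ _ _ _ hl', if_pos ht, pv_loopB_cons, if_neg hl,
              if_neg hemp, List.dropLast_concat, List.getLastD_concat]
            exact ih rest' hle' _ _ _ _
              (Or.inr ⟨_, front, cs ++ [l], rfl, rfl, by simp, rfl,
                by rw [pv_headD cs l hg]; exact hp, fun _ => rfl⟩)

-- ===== VERDICT (by name: the statement is the Claim_ definition above) =====
theorem parse_multi_file_diff_py_spec : Claim_equal_parse_multi_file_diff_py := by
  intro d _
  unfold Spec_parse_multi_file_diff_py parse_multi_file_diff_py parse_multi_file_diff_py_alt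
  exact pv_main _ _ (Nat.le_refl _) [] none [] [] (Or.inl ⟨rfl, rfl, rfl, rfl⟩)
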